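-- pv_equiv track=rewrite | github.com/minsuh99/BaekjoonHub_python_practice | 프로그래머스/2/12973. 짝지어 제거하기/짝지어 제거하기.py | solution
-- ===== SOURCE A (Python) =====
-- def solution(s):
--     answer = -1
--     stack = []
--
--     for char in s:
--         if not stack or char not in stack:
--             stack.append(char)
--         else:
--             if char == stack[-1]:
--                 stack.pop()
--             else:
--                 stack.append(char)
--     if len(stack) == 0:
--         answer = 1
--     else:
--         answer = 0
--
--     return answer
-- ===== SOURCE B (Python) =====
-- def solution(s):
--     # Rewrite to a fixpoint: each round makes one left-to-right pass that
--     # deletes every disjoint adjacent equal pair at once; repeat until a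
--     # pass deletes nothing, then answer 1 iff the remaining string is empty.
--     while True:
--         out = []
--         i = 0
--         n = len(s)
--         changed = False
--         while i < n:
--             if i + 1 < n and s[i] == s[i + 1]:
--                 i += 2
--                 changed = True
--             else:
--                 out.append(s[i])
--                 i += 1
--         if not changed:
--             return 1 if not s else 0
--         s = ''.join(out)
-- ===== Notes on version B (the rewrite author's own statement) =====
-- stated objective: alternative
-- what changed: Replaces A's stack (with its per-character membership scan) by fixpoint rewriting: repeated left-to-right passes that simultaneously delete all disjoint adjacent equal pairs until a pass deletes nothing, then checks emptiness.
import Mathlib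
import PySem

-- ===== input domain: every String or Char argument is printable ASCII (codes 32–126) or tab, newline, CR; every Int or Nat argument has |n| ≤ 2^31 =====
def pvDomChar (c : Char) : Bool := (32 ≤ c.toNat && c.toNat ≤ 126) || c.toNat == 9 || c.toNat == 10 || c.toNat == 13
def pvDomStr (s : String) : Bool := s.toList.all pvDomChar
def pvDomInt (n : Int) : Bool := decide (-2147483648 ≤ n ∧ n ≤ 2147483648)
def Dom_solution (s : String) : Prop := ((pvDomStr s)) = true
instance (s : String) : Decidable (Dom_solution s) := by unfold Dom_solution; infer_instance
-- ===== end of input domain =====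

-- B replaces A's stack algorithm by fixpoint rewriting: repeated passes that delete all
-- disjoint adjacent equal pairs at once until nothing changes (objective: alternative).

-- ===== PORT A =====
-- one iteration of A's loop: stack grows at its end, stack[-1] is the last element
def solStepA (stack : List Char) (c : Char) : List Char :=
  if stack = [] ∨ ¬ c ∈ stack then stack ++ [c]
  else if stack.getLast? = some c then stack.dropLast
  else stack ++ [c]

def solution (s : String) : Int :=
  let stack := s.toList.foldl solStepA []
  if stack.length = 0 then 1 else 0

-- ===== PORT B =====
-- one round of Source B's inner while loop: left-to-right pass deleting each disjoint
-- adjacent equal pair it meets; returns (out, changed)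
def onePass : List Char → List Char × Bool
  | a :: b :: t => if a = b then ((onePass t).1, true)
                   else ((a :: (onePass (b :: t)).1), (onePass (b :: t)).2)
  | [a] => ([a], false)
  | [] => ([], false)

theorem onePass_len (l : List Char) : (onePass l).1.length ≤ l.length := by
  induction l using onePass.induct with
  | case1 b t ih => simp only [onePass]; simp; omega
  | case2 a b t hab ih => simp [onePass, hab]; simpa using ih
  | case3 a => simp [onePass]
  | case4 => simp [onePass]

theorem onePass_len_changed (l : List Char) (h : (onePass l).2 = true) :
    (onePass l).1.length < l.length := by
  induction l using onePass.induct with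
  | case1 b t ih =>
    have := onePass_len t
    simp [onePass]; omega
  | case2 a b t hab ih =>
    simp only [onePass, if_neg hab] at h ⊢
    simpa using Nat.succ_lt_succ (ih h)
  | case3 a => simp [onePass] at h
  | case4 => simp [onePass] at h

-- Source B's outer while loop: repeat passes until one deletes nothing
def reduceFix (l : List Char) : List Char :=
  if h : (onePass l).2 = true then reduceFix (onePass l).1 else l
termination_by l.length
decreasing_by exact onePass_len_changed l h

def solution_alt (s : String) : Int :=
  if reduceFix s.toList = [] then 1 else 0

-- ===== PRECONDITION & SPEC =====
def Spec_solution (s : String) (out : Int) : Prop := out = solution_alt s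
instance (s : String) (out : Int) : Decidable (Spec_solution s out) := by unfold Spec_solution; infer_instance

-- ===== CLAIM (what is proved, stated in full; the proofs are below) =====
def Claim_equal_solution : Prop := ∀ (s : String), Dom_solution s → Spec_solution s (solution s)

-- ===== LEMMAS AND PROOFS =====

-- proof-side bridge: A's stack with its top at the head
def solStepB (stack : List Char) (c : Char) : List Char :=
  match stack with
  | t :: rest => if t = c then rest else c :: t :: rest
  | [] => [c]

-- A's step is B's step on the reversed stack
theorem solStep_rev (stack : List Char) (c : Char) :
    solStepA stack c = (solStepB stack.reverse c).reverse := by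
  induction stack using List.reverseRecOn with
  | nil => simp [solStepA, solStepB]
  | append_singleton xs x _ =>
    by_cases hx : x = c
    · subst hx
      simp [solStepA, solStepB]
    · have hlast : (xs ++ [x]).getLast? = some x := by simp
      by_cases hm : c ∈ xs ++ [x]
      · simp [solStepA, solStepB, hm, hlast, hx]
      · simp [solStepA, solStepB, hm, hx]

theorem foldl_rev (cs : List Char) : ∀ (stack : List Char),
    cs.foldl solStepA stack = (cs.foldl solStepB stack.reverse).reverse := by
  induction cs with
  | nil => simp
  | cons c cs ih =>
    intro stack
    simp only [List.foldl_cons]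
    rw [ih, solStep_rev, List.reverse_reverse]

-- an irreducible stack: no two adjacent equal elements
def Irred (l : List Char) : Prop := List.IsChain (· ≠ ·) l

theorem irred_step (st : List Char) (c : Char) (h : Irred st) : Irred (solStepB st c) := by
  cases st with
  | nil => simp [solStepB, Irred]
  | cons t rest =>
    by_cases htc : t = c
    · simpa [solStepB, htc, Irred] using (List.isChain_cons.mp h).2
    · simpa [solStepB, htc, Irred, List.isChain_cons_cons] using
        ⟨fun h' => htc h'.symm, h⟩

theorem step_step (st : List Char) (c : Char) (h : Irred st) :
    solStepB (solStepB st c) c = st := by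
  cases st with
  | nil => simp [solStepB]
  | cons t rest =>
    by_cases htc : t = c
    · subst htc
      cases rest with
      | nil => simp [solStepB]
      | cons u r =>
        have hut : t ≠ u := (List.isChain_cons_cons.mp h).1
        have hut' : ¬ u = t := fun h' => hut h'.symm
        simp [solStepB, hut']
    · simp [solStepB, htc]

-- one pass preserves the stack value (on an irreducible stack)
theorem foldl_onePass (l : List Char) : ∀ (st : List Char), Irred st →
    l.foldl solStepB st = (onePass l).1.foldl solStepB st := by
  induction l using onePass.induct with
  | case1 b t ih =>
    intro st hst
    simp only [onePass]
    simp only [List.foldl_cons]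
    rw [step_step st b hst]
    exact ih st hst
  | case2 a b t hab ih =>
    intro st hst
    simp only [onePass, if_neg hab, List.foldl_cons]
    have := ih (solStepB st a) (irred_step st a hst)
    simpa [List.foldl_cons] using this
  | case3 a => intro st _; rfl
  | case4 => intro st _; rfl

-- the fixpoint preserves the stack value
theorem foldl_reduceFix (l : List Char) :
    l.foldl solStepB [] = (reduceFix l).foldl solStepB [] := by
  induction l using reduceFix.induct with
  | case1 l h ih =>
    rw [reduceFix, dif_pos h, ← ih, ← foldl_onePass l [] (by simp [Irred])]
  | case2 l h =>
    rw [reduceFix, dif_neg h]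

-- an unchanged pass means no adjacent equal pair
theorem onePass_unchanged (l : List Char) (h : (onePass l).2 = false) : Irred l := by
  induction l using onePass.induct with
  | case1 b t ih => simp [onePass] at h
  | case2 a b t hab ih =>
    simp only [onePass, if_neg hab] at h
    exact List.isChain_cons_cons.mpr ⟨hab, ih h⟩
  | case3 a => simp [Irred]
  | case4 => simp [Irred]

theorem reduceFix_irred (l : List Char) : Irred (reduceFix l) := by
  induction l using reduceFix.induct with
  | case1 l h ih => rwa [reduceFix, dif_pos h]
  | case2 l h =>
    rw [reduceFix, dif_neg h]
    exact onePass_unchanged l (by simpa using h)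

-- processing an irreducible word from an empty stack only pushes
theorem foldl_irred (w : List Char) : ∀ (st : List Char), Irred w →
    (∀ c, w.head? = some c → st.head? ≠ some c) →
    w.foldl solStepB st = w.reverse ++ st := by
  induction w with
  | nil => intro st _ _; simp
  | cons c w ih =>
    intro st hw hhd
    have hpush : solStepB st c = c :: st := by
      cases st with
      | nil => rfl
      | cons t r =>
        have : t ≠ c := by
          intro h'; exact (hhd c rfl) (by simp [h'])
        simp [solStepB, this]
    simp only [List.foldl_cons, hpush]
    rw [ih (c :: st) (List.isChain_cons.mp hw).2]
    · simp
    · intro d hd hcd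
      rcases List.head?_eq_some_iff.mp hd with ⟨w', rfl⟩
      simp at hcd
      rcases List.isChain_cons.mp hw with ⟨h1, _⟩
      exact h1 d (by simp) hcd

-- ===== VERDICT (by name: the statement is the Claim_ definition above) =====
theorem solution_spec : Claim_equal_solution := by
  intro s _
  unfold Spec_solution solution solution_alt
  rw [foldl_rev, List.reverse_nil, foldl_reduceFix,
      foldl_irred (reduceFix s.toList) [] (reduceFix_irred s.toList) (by simp)]
  simp
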